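-- pv_equiv track=rewrite | github.com/arianahejazyan/chess-engine | Nyx/utils/mask_methods.py | descending_attacks_on_fly
-- ===== SOURCE A (Python) =====
-- def descending_attacks_on_fly(square: int, block: int) -> int:
--     """
--     Generates a bitboard representing the descending attacks from a given square on a chessboard, while considering blocking pieces.
--
--     Parameters:
--         square (int): The position of the attacking piece (0-based index) on the chessboard.
--         block (int): A bitboard representing the occupied squares (0-based index) on the chessboard where the attacks may stop.
--
--     Returns:
--         int: A bitboard representing the possible attack squares along the descending diagonal from the input square while considering blocking pieces.
--
--     Note:
--         - The function assumes that the square parameter is a non-negative integer less than the number of squares on a chessboard (usually 196).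
--         - The 'block' parameter represents a bitboard where each bit set to 1 indicates an occupied square where the attack may stop.
--         - The returned bitboard represents the attack squares along the descending diagonal, considering blocking pieces along the way.
--     """
--
--     # initialize bitboard mask
--     mask = 0
--
--     # calculate rank and file of the given square
--     r = square // 14
--     f = square % 14
--
--     # generate up-left direction attacks
--     for d in range(1, min(13 - r,f)):
--         mask ^= (1 << square + d * 13)
--         if (1 << square + d * 13) & block: break
--
--     # generate down-right direction attacks
--     for d in range(1, min(r,13 - f)):
--         mask ^= (1 << square - d * 13)
--         if (1 << square - d * 13) & block: break
--
--     return mask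
-- ===== SOURCE B (Python) =====
-- # Different algorithm: build each full diagonal ray first, then cut it at the first blocker
-- # with a single bit-scan (lowest blocker bit for the ascending ray, highest for the
-- # descending ray), instead of A's per-step scan with an early break.
--
-- def _cut_at_lowest(ray: int, block: int) -> int:
--     """Keep the ray bits up to and including its lowest blocker bit."""
--     blockers = ray & block
--     if blockers:
--         lsb = blockers & -blockers
--         return ray & ((lsb << 1) - 1)
--     return ray
--
--
-- def _cut_at_highest(ray: int, block: int) -> int:
--     """Keep the ray bits down to and including its highest blocker bit."""
--     blockers = ray & block
--     if blockers:
--         msb = 1 << (blockers.bit_length() - 1)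
--         return ray & -msb
--     return ray
--
--
-- def descending_attacks_on_fly(square: int, block: int) -> int:
--     r, f = divmod(square, 14)
--
--     up = 0
--     for d in range(1, min(13 - r, f)):
--         up |= 1 << (square + d * 13)
--
--     down = 0
--     for d in range(1, min(r, 13 - f)):
--         down |= 1 << (square - d * 13)
--
--     return _cut_at_lowest(up, block) | _cut_at_highest(down, block)
-- ===== Notes on version B (the rewrite author's own statement) =====
-- stated objective: alternative
-- what changed: A scans each diagonal step by step, XOR-ing bits and breaking at the first blocker; B builds each full ray bitboard first and then cuts it at the first blocker with a single bit-scan (lowest set bit of ray&block for the ascending ray via blockers&-blockers, highest via bit_length for the descending ray).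
import Mathlib
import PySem

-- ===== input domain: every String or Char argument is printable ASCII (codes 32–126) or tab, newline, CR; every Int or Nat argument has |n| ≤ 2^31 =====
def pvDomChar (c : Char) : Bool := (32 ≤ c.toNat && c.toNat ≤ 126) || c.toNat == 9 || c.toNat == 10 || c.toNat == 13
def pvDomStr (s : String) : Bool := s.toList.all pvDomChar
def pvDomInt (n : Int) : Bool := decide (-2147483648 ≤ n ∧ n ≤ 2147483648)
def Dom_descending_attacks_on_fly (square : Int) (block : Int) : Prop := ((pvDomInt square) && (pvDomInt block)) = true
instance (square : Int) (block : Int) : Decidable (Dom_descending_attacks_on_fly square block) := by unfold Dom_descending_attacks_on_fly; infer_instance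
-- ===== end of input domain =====

-- B replaces A's per-step blocker test with an early break by building each full
-- diagonal ray first and cutting it at its first blocker with one bit-scan
-- (lowest blocker bit on the ascending ray, highest on the descending ray);
-- objective: alternative algorithm of the same cost.

-- ===== PORT A =====

-- A's up-left loop: 'for d in range(1, min(13-r, f)): mask ^= 1 << (square+d*13); if (1 << (square+d*13)) & block: break'
def pvALoopUp (square block : Int) : List Int → Int → Int
  | [], mask => mask
  | d :: rest, mask =>
    let mask' := PySem.Int.bxor mask ((1 : Int) <<< (square + d * 13).toNat)
    if PySem.Int.band ((1 : Int) <<< (square + d * 13).toNat) block ≠ 0 then mask'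
    else pvALoopUp square block rest mask'

-- A's down-right loop, bit position square - d*13
def pvALoopDown (square block : Int) : List Int → Int → Int
  | [], mask => mask
  | d :: rest, mask =>
    let mask' := PySem.Int.bxor mask ((1 : Int) <<< (square - d * 13).toNat)
    if PySem.Int.band ((1 : Int) <<< (square - d * 13).toNat) block ≠ 0 then mask'
    else pvALoopDown square block rest mask'

def descending_attacks_on_fly (square : Int) (block : Int) : Int :=
  let r := PySem.Int.floordiv square 14
  let f := PySem.Int.mod square 14
  let mask := pvALoopUp square block (PySem.List.pyRange 1 (min (13 - r) f) 1) 0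
  pvALoopDown square block (PySem.List.pyRange 1 (min r (13 - f)) 1) mask

-- ===== PORT B =====

-- Source B: 'up |= 1 << (square + d * 13)' over the same range
def pvBRayUp (square : Int) : List Int → Int → Int
  | [], ray => ray
  | d :: rest, ray => pvBRayUp square rest (PySem.Int.bor ray ((1 : Int) <<< (square + d * 13).toNat))

def pvBRayDown (square : Int) : List Int → Int → Int
  | [], ray => ray
  | d :: rest, ray => pvBRayDown square rest (PySem.Int.bor ray ((1 : Int) <<< (square - d * 13).toNat))

-- Source B's _cut_at_lowest: keep ray bits up to and including the lowest blocker bit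
def pvCutLow (ray block : Int) : Int :=
  let blockers := PySem.Int.band ray block
  if blockers ≠ 0 then
    let lsb := PySem.Int.band blockers (-blockers)
    PySem.Int.band ray ((lsb <<< (1 : Nat)) - 1)
  else ray

-- Source B's _cut_at_highest: keep ray bits down to and including the highest blocker bit
def pvCutHigh (ray block : Int) : Int :=
  let blockers := PySem.Int.band ray block
  if blockers ≠ 0 then
    let msb := (1 : Int) <<< (PySem.Int.bitLength blockers - 1)
    PySem.Int.band ray (-msb)
  else ray

def descending_attacks_on_fly_alt (square : Int) (block : Int) : Int :=
  let r := PySem.Int.floordiv square 14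
  let f := PySem.Int.mod square 14
  let up := pvBRayUp square (PySem.List.pyRange 1 (min (13 - r) f) 1) 0
  let down := pvBRayDown square (PySem.List.pyRange 1 (min r (13 - f)) 1) 0
  PySem.Int.bor (pvCutLow up block) (pvCutHigh down block)

-- ===== PRECONDITION & SPEC =====
-- Python A raises ValueError (negative shift count 'square + d*13' at d = 1) exactly when
-- square ≤ -14 and square % 14 ≥ 2; Pre_ excludes precisely those raising inputs and nothing else.
def Pre_descending_attacks_on_fly (square : Int) (block : Int) : Prop :=
  -13 ≤ square ∨ PySem.Int.mod square 14 < 2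
instance (square : Int) (block : Int) : Decidable (Pre_descending_attacks_on_fly square block) := by
  unfold Pre_descending_attacks_on_fly; infer_instance

def pvWitness_descending_attacks_on_fly : Int × Int := (30, 131072)

def Spec_descending_attacks_on_fly (square : Int) (block : Int) (out : Int) : Prop :=
  out = descending_attacks_on_fly_alt square block
instance (square : Int) (block : Int) (out : Int) : Decidable (Spec_descending_attacks_on_fly square block out) := by
  unfold Spec_descending_attacks_on_fly; infer_instance

-- ===== CLAIM (what is proved, stated in full; the proofs are below) =====
def Claim_equal_descending_attacks_on_fly : Prop :=
  ∀ (square : Int) (block : Int), Dom_descending_attacks_on_fly square block →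
    Pre_descending_attacks_on_fly square block →
    Spec_descending_attacks_on_fly square block (descending_attacks_on_fly square block)

-- ===== LEMMAS AND PROOFS =====

-- Python's bit i of an arbitrary (two's-complement) integer
def pvBit (block : Int) (i : Nat) : Bool :=
  if 0 ≤ block then block.toNat.testBit i else !((-block - 1).toNat.testBit i)

-- Nat value of Python's 'x & block' for a natural x
def pvPBand (x : Nat) (block : Int) : Nat :=
  if 0 ≤ block then x &&& block.toNat else x - (x &&& (-block - 1).toNat)

-- value of a bitboard with the given (distinct) bit positions set
def pvRayN (ps : List Nat) : Nat := (ps.map (2 ^ ·)).sum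

-- positions A's loop visits: everything up to and including the first blocked one
def pvKeep (block : Int) : List Nat → List Nat
  | [] => []
  | p :: rest => p :: (if pvBit block p then [] else pvKeep block rest)

-- the generic loop both of A's direction loops instantiate (positions already Nat)
def pvGLoop (block : Int) : List Nat → Int → Int
  | [], mask => mask
  | p :: rest, mask =>
    let mask' := PySem.Int.bxor mask ((1 : Int) <<< p)
    if PySem.Int.band ((1 : Int) <<< p) block ≠ 0 then mask'
    else pvGLoop block rest mask'

-- the generic ray loop both of B's direction loops instantiate
def pvGRay : List Nat → Int → Int
  | [], ray => ray
  | p :: rest, ray => pvGRay rest (PySem.Int.bor ray ((1 : Int) <<< p))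

theorem pvAddEqLor (x y : Nat) (h : x &&& y = 0) : x + y = x ||| y := by
  induction x using Nat.binaryRec generalizing y with
  | zero => simp
  | bit a m ih =>
    induction y using Nat.binaryRec with
    | zero => simp
    | bit b n _ =>
      rw [Nat.land_bit] at h
      obtain ⟨hmn, hab⟩ := Nat.bit_eq_zero_iff.mp h
      rw [Nat.lor_bit, Nat.bit_val, Nat.bit_val, Nat.bit_val]
      have ih' := ih n hmn
      cases a <;> cases b <;> simp at hab ⊢ <;> omega

theorem pvSubAnd (x m : Nat) : x - (x &&& m) = x.ldiff m := by
  have h1 : x.ldiff m &&& (x &&& m) = 0 := by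
    apply Nat.eq_of_testBit_eq
    intro i
    simp only [Nat.testBit_ldiff, Nat.testBit_land, Nat.zero_testBit]
    cases x.testBit i <;> cases m.testBit i <;> simp
  have h2 : x.ldiff m ||| (x &&& m) = x := by
    apply Nat.eq_of_testBit_eq
    intro i
    simp only [Nat.testBit_lor, Nat.testBit_ldiff, Nat.testBit_land]
    cases x.testBit i <;> cases m.testBit i <;> simp
  have h3 := pvAddEqLor _ _ h1
  have h4 : x &&& m ≤ x := Nat.and_le_left
  omega

theorem pvPBand_testBit (x : Nat) (block : Int) (i : Nat) :
    (pvPBand x block).testBit i = (x.testBit i && pvBit block i) := by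
  unfold pvPBand pvBit
  split
  · rw [Nat.testBit_land]
  · rw [pvSubAnd, Nat.testBit_ldiff]

theorem pvBand_cast (x : Nat) (block : Int) :
    PySem.Int.band (↑x) block = ↑(pvPBand x block) := by
  unfold PySem.Int.band pvPBand
  rw [if_pos (by positivity : (0:Int) ≤ ↑x)]
  split <;> simp

theorem pvShift_one (p : Nat) : (1 : Int) <<< p = ((2 ^ p : Nat) : Int) := by
  rw [Int.shiftLeft_eq]; push_cast; ring

theorem pvXorAdd (m p : Nat) (h : m.testBit p = false) : m ^^^ 2 ^ p = m + 2 ^ p := by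
  have hd : m &&& 2 ^ p = 0 := by rw [Nat.and_two_pow, h]; simp
  rw [pvAddEqLor _ _ hd]
  apply Nat.eq_of_testBit_eq
  intro i
  simp only [Nat.testBit_xor, Nat.testBit_lor]
  rcases eq_or_ne p i with rfl | hne
  · simp [h]
  · simp [hne]

theorem pvAndPowSubOne (x k : Nat) : x &&& (2 ^ k - 1) = x % 2 ^ k := by
  apply Nat.eq_of_testBit_eq
  intro i
  simp only [Nat.testBit_land, Nat.testBit_two_pow_sub_one, Nat.testBit_mod_two_pow]
  cases x.testBit i <;> simp

theorem pvPB_iff (p : Nat) (block : Int) :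
    (PySem.Int.band ((1 : Int) <<< p) block ≠ 0) ↔ pvBit block p = true := by
  rw [pvShift_one, pvBand_cast]
  have hv : pvPBand (2 ^ p) block = if pvBit block p then 2 ^ p else 0 := by
    apply Nat.eq_of_testBit_eq
    intro i
    rw [pvPBand_testBit]
    rcases eq_or_ne p i with rfl | hne
    · by_cases hb : pvBit block p <;> simp [hb]
    · by_cases hb : pvBit block p <;> simp [hb, hne]
  rw [hv]
  by_cases hb : pvBit block p <;> simp [hb]

theorem pvRayN_cons (p : Nat) (rest : List Nat) : pvRayN (p :: rest) = 2 ^ p + pvRayN rest := by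
  simp [pvRayN]

theorem pvRayN_reverse (ps : List Nat) : pvRayN ps.reverse = pvRayN ps := by
  simp [pvRayN]

theorem pvRayN_lt (ps : List Nat) (k : Nat) (hs : ps.Pairwise (· > ·))
    (hk : ∀ p ∈ ps, p < k) : pvRayN ps < 2 ^ k := by
  induction ps generalizing k with
  | nil => simp [pvRayN]
  | cons p rest ih =>
    rw [List.pairwise_cons] at hs
    have h1 : pvRayN rest < 2 ^ p := ih p hs.2 hs.1
    have hp : p < k := hk p (List.mem_cons_self ..)
    rw [pvRayN_cons]
    calc 2 ^ p + pvRayN rest < 2 ^ p + 2 ^ p := by omega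
    _ = 2 ^ (p + 1) := by ring
    _ ≤ 2 ^ k := Nat.pow_le_pow_right (by norm_num) hp

theorem pvRayN_testBit (ps : List Nat) (hs : ps.Pairwise (· > ·)) (i : Nat) :
    (pvRayN ps).testBit i = decide (i ∈ ps) := by
  induction ps with
  | nil => simp [pvRayN]
  | cons p rest ih =>
    rw [List.pairwise_cons] at hs
    have h1 : pvRayN rest < 2 ^ p := pvRayN_lt rest p hs.2 hs.1
    have hd : 2 ^ p &&& pvRayN rest = 0 := by
      rw [Nat.two_pow_and, Nat.testBit_lt_two_pow h1, Bool.toNat_false, Nat.mul_zero]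
    rw [pvRayN_cons, pvAddEqLor _ _ hd, Nat.testBit_lor, ih hs.2, Nat.testBit_two_pow]
    rcases eq_or_ne p i with rfl | hne
    · simp
    · simp [hne, Ne.symm hne]

theorem pvRayN_testBit_asc (ps : List Nat) (hs : ps.Pairwise (· < ·)) (i : Nat) :
    (pvRayN ps).testBit i = decide (i ∈ ps) := by
  rw [← pvRayN_reverse ps, pvRayN_testBit ps.reverse (List.pairwise_reverse.mpr hs) i]
  simp

theorem pvRayN_dvd (ps : List Nat) (k : Nat) (h : ∀ p ∈ ps, k ≤ p) : 2 ^ k ∣ pvRayN ps := by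
  apply List.dvd_sum
  intro x hx
  obtain ⟨p, hp, rfl⟩ := List.mem_map.mp hx
  exact pow_dvd_pow 2 (h p hp)

theorem pvPBand_eq_ray (block : Int) (ps : List Nat) (hs : ps.Pairwise (· > ·)) :
    pvPBand (pvRayN ps) block = pvRayN (ps.filter (fun p => pvBit block p)) := by
  apply Nat.eq_of_testBit_eq
  intro i
  rw [pvPBand_testBit, pvRayN_testBit ps hs i, pvRayN_testBit _ (hs.filter _) i]
  by_cases hi : i ∈ ps
  · by_cases hb : pvBit block i <;> simp [hi, hb, List.mem_filter]
  · simp [hi]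

theorem pvPBand_eq_ray_asc (block : Int) (ps : List Nat) (hs : ps.Pairwise (· < ·)) :
    pvPBand (pvRayN ps) block = pvRayN (ps.filter (fun p => pvBit block p)) := by
  rw [← pvRayN_reverse ps, pvPBand_eq_ray block ps.reverse (List.pairwise_reverse.mpr hs),
    List.filter_reverse, pvRayN_reverse]

theorem pvRayN_mod (ps : List Nat) (k : Nat) (hs : ps.Pairwise (· > ·)) :
    pvRayN ps % 2 ^ k = pvRayN (ps.filter (fun p => decide (p < k))) := by
  apply Nat.eq_of_testBit_eq
  intro i
  rw [Nat.testBit_mod_two_pow, pvRayN_testBit ps hs i, pvRayN_testBit _ (hs.filter _) i]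
  by_cases hi : i ∈ ps
  · by_cases hk : i < k <;> simp [hi, hk, List.mem_filter]
  · simp [hi]

theorem pvRayN_mod_asc (ps : List Nat) (k : Nat) (hs : ps.Pairwise (· < ·)) :
    pvRayN ps % 2 ^ k = pvRayN (ps.filter (fun p => decide (p < k))) := by
  rw [← pvRayN_reverse ps, pvRayN_mod ps.reverse k (List.pairwise_reverse.mpr hs),
    List.filter_reverse, pvRayN_reverse]

theorem pvLsbAnd (p w : Nat) :
    (2 ^ p + 2 ^ (p + 1) * w) &&& (2 ^ p + 2 ^ (p + 1) * w - 1) = 2 ^ (p + 1) * w := by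
  have e1 : 2 ^ p + 2 ^ (p + 1) * w = 2 ^ p ||| 2 ^ (p + 1) * w := by
    rw [← pvAddEqLor]
    apply Nat.eq_of_testBit_eq
    intro i
    simp only [Nat.testBit_land, Nat.testBit_two_pow, Nat.zero_testBit]
    rcases eq_or_ne p i with rfl | hne
    · rw [Nat.mul_comm, Nat.testBit_mul_two_pow]
      simp
    · simp [hne]
  have e2 : 2 ^ p + 2 ^ (p + 1) * w - 1 = (2 ^ p - 1) ||| 2 ^ (p + 1) * w := by
    have h1 : 0 < 2 ^ p := Nat.two_pow_pos p
    have : 2 ^ p + 2 ^ (p + 1) * w - 1 = (2 ^ p - 1) + 2 ^ (p + 1) * w := by omega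
    rw [this, pvAddEqLor]
    apply Nat.eq_of_testBit_eq
    intro i
    simp only [Nat.testBit_land, Nat.testBit_two_pow_sub_one, Nat.zero_testBit,
      Nat.mul_comm (2 ^ (p + 1)) w, Nat.testBit_mul_two_pow]
    by_cases hi : i < p
    · simp [hi]; omega
    · simp [hi]
  rw [e2, e1]
  apply Nat.eq_of_testBit_eq
  intro i
  simp only [Nat.testBit_land, Nat.testBit_lor, Nat.testBit_two_pow,
    Nat.testBit_two_pow_sub_one, Nat.mul_comm (2 ^ (p + 1)) w, Nat.testBit_mul_two_pow]
  rcases eq_or_ne p i with rfl | hne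
  · simp
  · by_cases hi : i < p
    · simp [hne, hi]
    · simp [hne, hi]

theorem pvBandNegSelf (b : Nat) (hb : 0 < b) :
    PySem.Int.band (↑b) (-(↑b : Int)) = ↑(b - (b &&& (b - 1))) := by
  unfold PySem.Int.band
  rw [if_pos (by positivity : (0:Int) ≤ (b:Int)), if_neg (by omega : ¬ (0:Int) ≤ -(b:Int))]
  congr 1
  have h1 : (-(-(b:Int)) - 1).toNat = b - 1 := by omega
  have h2 : ((b : Int)).toNat = b := Int.toNat_natCast b
  rw [h1, h2]

theorem pvBandNegPow (x q : Nat) :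
    PySem.Int.band (↑x) (-((2 ^ q : Nat) : Int)) = ↑(x - x % 2 ^ q) := by
  unfold PySem.Int.band
  have hq : (0:Int) < ((2 ^ q : Nat) : Int) := by exact_mod_cast Nat.two_pow_pos q
  rw [if_pos (by positivity : (0:Int) ≤ (x:Int)), if_neg (by omega : ¬ (0:Int) ≤ -((2 ^ q : Nat) : Int))]
  congr 1
  have h1 : (-(-((2 ^ q : Nat) : Int)) - 1).toNat = 2 ^ q - 1 := by omega
  rw [h1, Int.toNat_natCast, pvAndPowSubOne]

theorem pvBitLen (q v : Nat) (hv : v < 2 ^ q) :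
    PySem.Int.bitLength ((2 ^ q + v : Nat) : Int) = q + 1 := by
  set n : Int := ((2 ^ q + v : Nat) : Int) with hn
  have hq : 0 < 2 ^ q := Nat.two_pow_pos q
  have hne : n ≠ 0 := by simp [hn]; positivity
  have h1 := PySem.Int.lt_two_pow_bitLength n
  have h2 := PySem.Int.two_pow_bitLength_le n hne
  have habs : n.natAbs = 2 ^ q + v := by rw [hn, Int.natAbs_natCast]
  rw [habs] at h1 h2
  set L := PySem.Int.bitLength n with hL
  have hgt : q < L := by
    by_contra hcon
    have : 2 ^ L ≤ 2 ^ q := Nat.pow_le_pow_right (by norm_num) (by omega)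
    omega
  have hlt : L - 1 < q + 1 := by
    by_contra hcon
    have h3 : 2 ^ (q + 1) ≤ 2 ^ (L - 1) := Nat.pow_le_pow_right (by norm_num) (by omega)
    have h4 : 2 ^ (q + 1) = 2 ^ q + 2 ^ q := by ring
    omega
  omega

theorem pvKeep_sublist (block : Int) (ps : List Nat) : List.Sublist (pvKeep block ps) ps := by
  induction ps with
  | nil => simp [pvKeep]
  | cons p rest ih =>
    rw [pvKeep]
    split
    · exact (List.nil_sublist rest).cons₂ p
    · exact ih.cons₂ p

theorem pvKeep_eq_self (block : Int) (ps : List Nat)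
    (h : ∀ p ∈ ps, pvBit block p = false) : pvKeep block ps = ps := by
  induction ps with
  | nil => rfl
  | cons p rest ih =>
    rw [pvKeep, if_neg (by simp [h p (List.mem_cons_self ..)]),
      ih (fun q hq => h q (List.mem_cons_of_mem p hq))]

theorem pvKeep_mod (block : Int) (ps : List Nat) (q0 : Nat) (tl : List Nat)
    (hs : ps.Pairwise (· < ·)) (hf : ps.filter (fun p => pvBit block p) = q0 :: tl) :
    pvRayN (pvKeep block ps) = pvRayN ps % 2 ^ (q0 + 1) := by
  induction ps generalizing tl with
  | nil => simp at hf
  | cons p rest ih =>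
    rw [List.pairwise_cons] at hs
    rw [List.filter_cons] at hf
    by_cases hb : pvBit block p
    · rw [if_pos hb] at hf
      obtain rfl : p = q0 := (List.cons_eq_cons.mp hf).1
      obtain ⟨w, hw⟩ : (2:Nat) ^ (p + 1) ∣ pvRayN rest :=
        pvRayN_dvd rest (p + 1) (fun q hq => hs.1 q hq)
      rw [pvKeep, if_pos hb, pvRayN_cons, pvRayN_cons, hw,
        Nat.add_mul_mod_self_left, Nat.mod_eq_of_lt (by
          have h2 : (2:Nat) ^ (p + 1) = 2 ^ p + 2 ^ p := by ring
          have := Nat.two_pow_pos p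
          omega)]
      simp [pvRayN]
    · rw [if_neg hb] at hf
      have hq0 : q0 ∈ rest := by
        have hm : q0 ∈ rest.filter (fun p => pvBit block p) := by
          rw [hf]; exact List.mem_cons_self ..
        exact List.mem_of_mem_filter hm
      have hpq : p < q0 := hs.1 q0 hq0
      have hsc : (p :: rest).Pairwise (· < ·) := List.pairwise_cons.mpr hs
      rw [pvKeep, if_neg hb, pvRayN_cons, ih tl hs.2 hf,
        pvRayN_mod_asc _ _ hsc, List.filter_cons,
        if_pos (by simpa using by omega : decide (p < q0 + 1) = true),
        pvRayN_cons, ← pvRayN_mod_asc rest _ hs.2]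

theorem pvKeep_msb (block : Int) (ps : List Nat) (q0 : Nat) (tl : List Nat)
    (hs : ps.Pairwise (· > ·)) (hf : ps.filter (fun p => pvBit block p) = q0 :: tl) :
    pvRayN (pvKeep block ps) = pvRayN ps - pvRayN ps % 2 ^ q0 := by
  induction ps generalizing tl with
  | nil => simp at hf
  | cons p rest ih =>
    rw [List.pairwise_cons] at hs
    rw [List.filter_cons] at hf
    by_cases hb : pvBit block p
    · rw [if_pos hb] at hf
      obtain rfl : p = q0 := (List.cons_eq_cons.mp hf).1
      have hlt : pvRayN rest < 2 ^ p := pvRayN_lt rest p hs.2 hs.1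
      rw [pvKeep, if_pos hb, pvRayN_cons, pvRayN_cons, Nat.add_mod_left,
        Nat.mod_eq_of_lt hlt]
      simp [pvRayN]
    · rw [if_neg hb] at hf
      have hq0 : q0 ∈ rest := by
        have hm : q0 ∈ rest.filter (fun p => pvBit block p) := by
          rw [hf]; exact List.mem_cons_self ..
        exact List.mem_of_mem_filter hm
      have hpq : q0 < p := hs.1 q0 hq0
      obtain ⟨t, ht⟩ : (2:Nat) ^ q0 ∣ 2 ^ p := pow_dvd_pow 2 (by omega)
      have hmle : pvRayN rest % 2 ^ q0 ≤ pvRayN rest := Nat.mod_le _ _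
      rw [pvKeep, if_neg hb, pvRayN_cons, ih tl hs.2 hf, pvRayN_cons, ht,
        Nat.mul_add_mod]
      omega

theorem pvGLoop_eq (block : Int) (ps : List Nat) (m : Nat)
    (hnd : ps.Pairwise (· ≠ ·)) (hm : ∀ p ∈ ps, m.testBit p = false) :
    pvGLoop block ps (↑m) = ↑(m + pvRayN (pvKeep block ps)) := by
  induction ps generalizing m with
  | nil => simp [pvGLoop, pvKeep, pvRayN]
  | cons p rest ih =>
    rw [List.pairwise_cons] at hnd
    have hmp : m.testBit p = false := hm p (List.mem_cons_self ..)
    rw [pvGLoop]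
    simp only [pvShift_one, PySem.Int.bxor_natCast, pvXorAdd m p hmp]
    by_cases hb : pvBit block p
    · rw [if_pos (by rw [← pvShift_one]; exact (pvPB_iff p block).mpr hb)]
      rw [pvKeep, if_pos hb, pvRayN_cons]
      simp [pvRayN]
    · rw [if_neg (by rw [← pvShift_one]; exact fun hc => hb ((pvPB_iff p block).mp hc))]
      rw [ih (m + 2 ^ p) hnd.2 (fun q hq => by
        rw [← pvXorAdd m p hmp, Nat.testBit_xor, hm q (List.mem_cons_of_mem p hq),
          Nat.testBit_two_pow, decide_eq_false (hnd.1 q hq)]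
        rfl)]
      rw [pvKeep, if_neg hb, pvRayN_cons]
      congr 1
      omega

theorem pvGRay_eq (ps : List Nat) (m : Nat)
    (hnd : ps.Pairwise (· ≠ ·)) (hm : ∀ p ∈ ps, m.testBit p = false) :
    pvGRay ps (↑m) = ↑(m + pvRayN ps) := by
  induction ps generalizing m with
  | nil => simp [pvGRay, pvRayN]
  | cons p rest ih =>
    rw [List.pairwise_cons] at hnd
    have hmp : m.testBit p = false := hm p (List.mem_cons_self ..)
    have hor : (m : Nat) ||| 2 ^ p = m + 2 ^ p := by
      rw [← pvAddEqLor m (2 ^ p) (by rw [Nat.and_two_pow, hmp]; simp)]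
    rw [pvGRay, pvShift_one, PySem.Int.bor_natCast, hor]
    rw [ih (m + 2 ^ p) hnd.2 (fun q hq => by
      rw [← hor, Nat.testBit_lor, hm q (List.mem_cons_of_mem p hq),
        Nat.testBit_two_pow, decide_eq_false (hnd.1 q hq)]
      rfl)]
    rw [pvRayN_cons]
    congr 1
    omega

theorem pvCutLow_eq (block : Int) (ps : List Nat) (hs : ps.Pairwise (· < ·)) :
    pvCutLow (↑(pvRayN ps)) block = ↑(pvRayN (pvKeep block ps)) := by
  unfold pvCutLow
  rw [pvBand_cast, pvPBand_eq_ray_asc block ps hs]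
  cases hful : ps.filter (fun p => pvBit block p) with
  | nil =>
    rw [if_neg (by simp [pvRayN]), pvKeep_eq_self block ps
      (by intro q hq; by_contra hc; simp at hc
          exact (List.filter_eq_nil_iff.mp hful) q hq (by simp [hc]))]
  | cons q0 tlq =>
    have hsf : (q0 :: tlq).Pairwise (· < ·) := hful ▸ hs.filter _
    rw [List.pairwise_cons] at hsf
    obtain ⟨w, hw⟩ : (2:Nat) ^ (q0 + 1) ∣ pvRayN tlq :=
      pvRayN_dvd tlq (q0 + 1) (fun q hq => hsf.1 q hq)
    have hbl : pvRayN (q0 :: tlq) = 2 ^ q0 + 2 ^ (q0 + 1) * w := by rw [pvRayN_cons, hw]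
    have h2p := Nat.two_pow_pos q0
    have hpos : 0 < pvRayN (q0 :: tlq) := by rw [hbl]; omega
    rw [if_pos (Int.natCast_ne_zero.mpr (by omega))]
    rw [pvBandNegSelf _ hpos, hbl, pvLsbAnd]
    have hlsb : 2 ^ q0 + 2 ^ (q0 + 1) * w - 2 ^ (q0 + 1) * w = 2 ^ q0 := by omega
    rw [hlsb]
    show PySem.Int.band (↑(pvRayN ps)) ((((2 ^ q0 : Nat) : Int)) <<< (1 : Nat) - 1)
      = ↑(pvRayN (pvKeep block ps))
    have hsh : (((2 ^ q0 : Nat) : Int)) <<< (1 : Nat) = ((2 ^ (q0 + 1) : Nat) : Int) := by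
      rw [Int.shiftLeft_eq]; push_cast; ring
    have hm1 : ((2 ^ (q0 + 1) : Nat) : Int) - 1 = ((2 ^ (q0 + 1) - 1 : Nat) : Int) := by
      have := Nat.two_pow_pos (q0 + 1); omega
    rw [hsh, hm1, PySem.Int.band_natCast, pvAndPowSubOne,
      ← pvKeep_mod block ps q0 tlq hs hful]

theorem pvCutHigh_eq (block : Int) (ps : List Nat) (hs : ps.Pairwise (· > ·)) :
    pvCutHigh (↑(pvRayN ps)) block = ↑(pvRayN (pvKeep block ps)) := by
  unfold pvCutHigh
  rw [pvBand_cast, pvPBand_eq_ray block ps hs]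
  cases hful : ps.filter (fun p => pvBit block p) with
  | nil =>
    rw [if_neg (by simp [pvRayN]), pvKeep_eq_self block ps
      (by intro q hq; by_contra hc; simp at hc
          exact (List.filter_eq_nil_iff.mp hful) q hq (by simp [hc]))]
  | cons q0 tlq =>
    have hsf : (q0 :: tlq).Pairwise (· > ·) := hful ▸ hs.filter _
    rw [List.pairwise_cons] at hsf
    have hV : pvRayN tlq < 2 ^ q0 := pvRayN_lt tlq q0 hsf.2 hsf.1
    have hbl : pvRayN (q0 :: tlq) = 2 ^ q0 + pvRayN tlq := pvRayN_cons q0 tlq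
    have h2p := Nat.two_pow_pos q0
    have hpos : 0 < pvRayN (q0 :: tlq) := by rw [hbl]; omega
    rw [if_pos (Int.natCast_ne_zero.mpr (by omega))]
    rw [hbl, pvBitLen q0 (pvRayN tlq) hV]
    show PySem.Int.band (↑(pvRayN ps)) (-((1 : Int) <<< (q0 + 1 - 1)))
      = ↑(pvRayN (pvKeep block ps))
    have hq1 : q0 + 1 - 1 = q0 := rfl
    rw [hq1, pvShift_one, pvBandNegPow, ← pvKeep_msb block ps q0 tlq hs hful]

theorem pvALoopUp_eq (square block : Int) (ds : List Int) (mask : Int) :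
    pvALoopUp square block ds mask
      = pvGLoop block (ds.map (fun d => (square + d * 13).toNat)) mask := by
  induction ds generalizing mask with
  | nil => rfl
  | cons d rest ih =>
    rw [List.map_cons, pvALoopUp, pvGLoop]
    split
    · rfl
    · exact ih _

theorem pvALoopDown_eq (square block : Int) (ds : List Int) (mask : Int) :
    pvALoopDown square block ds mask
      = pvGLoop block (ds.map (fun d => (square - d * 13).toNat)) mask := by
  induction ds generalizing mask with
  | nil => rfl
  | cons d rest ih =>
    rw [List.map_cons, pvALoopDown, pvGLoop]
    split
    · rfl
    · exact ih _

theorem pvBRayUp_eq (square : Int) (ds : List Int) (ray : Int) :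
    pvBRayUp square ds ray = pvGRay (ds.map (fun d => (square + d * 13).toNat)) ray := by
  induction ds generalizing ray with
  | nil => rfl
  | cons d rest ih => rw [List.map_cons, pvBRayUp, pvGRay]; exact ih _

theorem pvBRayDown_eq (square : Int) (ds : List Int) (ray : Int) :
    pvBRayDown square ds ray = pvGRay (ds.map (fun d => (square - d * 13).toNat)) ray := by
  induction ds generalizing ray with
  | nil => rfl
  | cons d rest ih => rw [List.map_cons, pvBRayDown, pvGRay]; exact ih _

theorem pvRange_pairwise (n : Int) : (PySem.List.pyRange 1 n 1).Pairwise (· < ·) := by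
  rw [PySem.List.pyRange_of_pos 1 n (by norm_num)]
  refine List.pairwise_map.mpr ?_
  refine List.pairwise_lt_range.imp ?_
  intro a b h
  omega

-- ===== VERDICT (by name: the statement is the Claim_ definition above) =====
theorem descending_attacks_on_fly_spec : Claim_equal_descending_attacks_on_fly := by
  intro square block _hdom hpre
  unfold Spec_descending_attacks_on_fly
  -- arithmetic facts about r and f
  have hrf := PySem.Int.floordiv_mul_add_mod square 14
  have hf0 := PySem.Int.mod_nonneg square (show (0:Int) < 14 by norm_num)
  have hf14 := PySem.Int.mod_lt square (show (0:Int) < 14 by norm_num)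
  set r := PySem.Int.floordiv square 14 with hr
  set f := PySem.Int.mod square 14 with hf
  have hpre' : -13 ≤ square ∨ f < 2 := hpre
  -- the two direction ranges and position lists
  set dsU := PySem.List.pyRange 1 (min (13 - r) f) 1 with hdsU
  set dsD := PySem.List.pyRange 1 (min r (13 - f)) 1 with hdsD
  set psU := dsU.map (fun d => (square + d * 13).toNat) with hpsU
  set psD := dsD.map (fun d => (square - d * 13).toNat) with hpsD
  have hmemU : ∀ d ∈ dsU, 1 ≤ d ∧ d < 13 - r ∧ d < f := by
    intro d hd
    have h := PySem.List.mem_pyRange_one.mp hd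
    exact ⟨h.1, lt_min_iff.mp h.2 |>.1, lt_min_iff.mp h.2 |>.2⟩
  have hmemD : ∀ d ∈ dsD, 1 ≤ d ∧ d < r ∧ d < 13 - f := by
    intro d hd
    have h := PySem.List.mem_pyRange_one.mp hd
    exact ⟨h.1, lt_min_iff.mp h.2 |>.1, lt_min_iff.mp h.2 |>.2⟩
  have hUnn : ∀ d ∈ dsU, 0 ≤ square + d * 13 := by
    intro d hd
    have h := hmemU d hd
    omega
  have hDnn : ∀ d ∈ dsD, 0 ≤ square - d * 13 := by
    intro d hd
    have h := hmemD d hd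
    omega
  have hsU : psU.Pairwise (· < ·) := by
    rw [hpsU]
    refine List.pairwise_map.mpr ?_
    refine (pvRange_pairwise _).imp_of_mem ?_
    intro a b ha hb hab
    have h1 := hUnn a ha
    have h2 := hUnn b hb
    omega
  have hsD : psD.Pairwise (· > ·) := by
    rw [hpsD]
    refine List.pairwise_map.mpr ?_
    refine (pvRange_pairwise _).imp_of_mem ?_
    intro a b ha hb hab
    have h1 := hDnn a ha
    have h2 := hDnn b hb
    omega
  have hsep : ∀ i, i ∈ psU → i ∈ psD → False := by
    intro i hiU hiD
    obtain ⟨a, ha, rfl⟩ := List.mem_map.mp hiU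
    obtain ⟨b, hb, hba⟩ := List.mem_map.mp hiD
    have h1 := hmemU a ha
    have h2 := hmemD b hb
    have h3 := hUnn a ha
    have h4 := hDnn b hb
    omega
  set U := pvRayN (pvKeep block psU) with hU
  set D := pvRayN (pvKeep block psD) with hD
  have hUbit : ∀ i, U.testBit i = decide (i ∈ pvKeep block psU) :=
    fun i => pvRayN_testBit_asc _ (List.Pairwise.sublist (pvKeep_sublist block psU) hsU) i
  have hDbit : ∀ i, D.testBit i = decide (i ∈ pvKeep block psD) :=
    fun i => pvRayN_testBit _ (List.Pairwise.sublist (pvKeep_sublist block psD) hsD) i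
  have hndU : psU.Pairwise (· ≠ ·) := hsU.imp (fun h => Nat.ne_of_lt h)
  have hndD : psD.Pairwise (· ≠ ·) := hsD.imp (fun h => Nat.ne_of_gt h)
  -- A's value
  have hA : descending_attacks_on_fly square block = ↑(U + D) := by
    show pvALoopDown square block dsD (pvALoopUp square block dsU 0) = ↑(U + D)
    rw [pvALoopUp_eq, ← hpsU, show (0 : Int) = ((0 : Nat) : Int) from rfl,
      pvGLoop_eq block psU 0 hndU (by simp), Nat.zero_add, pvALoopDown_eq, ← hpsD,
      pvGLoop_eq block psD U hndD (by
        intro q hq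
        rw [hUbit q]
        have hq' : q ∉ pvKeep block psU := fun hc =>
          hsep q ((pvKeep_sublist block psU).subset hc) hq
        simp [hq'])]
  -- B's value
  have hUD : U &&& D = 0 := by
    apply Nat.eq_of_testBit_eq
    intro i
    rw [Nat.testBit_land, hUbit i, hDbit i, Nat.zero_testBit]
    by_cases hiU : i ∈ pvKeep block psU
    · have hiD : i ∉ pvKeep block psD := fun hc =>
        hsep i ((pvKeep_sublist block psU).subset hiU) ((pvKeep_sublist block psD).subset hc)
      simp [hiD]
    · simp [hiU]
  have hB : descending_attacks_on_fly_alt square block = ↑(U + D) := by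
    show PySem.Int.bor (pvCutLow (pvBRayUp square dsU 0) block)
      (pvCutHigh (pvBRayDown square dsD 0) block) = ↑(U + D)
    rw [pvBRayUp_eq, ← hpsU, show (0 : Int) = ((0 : Nat) : Int) from rfl,
      pvGRay_eq psU 0 hndU (by simp), Nat.zero_add, pvCutLow_eq block psU hsU,
      pvBRayDown_eq, ← hpsD, pvGRay_eq psD 0 hndD (by simp), Nat.zero_add,
      pvCutHigh_eq block psD hsD, ← hU, ← hD, PySem.Int.bor_natCast,
      ← pvAddEqLor U D hUD]
  rw [hA, hB]
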